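-- pv_equiv track=rewrite | github.com/MrBrantCode/unitest_baseline | mut_generate/mist_train_taco/taco_9567/solution.py | min_cash_flow
-- ===== SOURCE A (Python) =====
-- from typing import List
--
-- def min_cash_flow(n: int, transaction: List[List[int]]) -> List[List[int]]:
--     optArr = [[0 for _ in range(n)] for _ in range(n)]
--     graph = [[] for _ in range(n)]
--     amounts = [0 for _ in range(n)]
--
--     for i in range(n):
--         for j in range(n):
--             if transaction[i][j]:
--                 graph[i].append([j, transaction[i][j]])
--
--     for i in range(n):
--         curLen = len(graph[i])
--         for j in range(curLen):
--             amounts[i] -= graph[i][j][1]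
--             amounts[graph[i][j][0]] += graph[i][j][1]
--
--     while True:
--         maxCredit = 0
--         maxDebit = 0
--         ci = None
--         di = None
--
--         for i in range(n):
--             if amounts[i] > maxCredit:
--                 ci = i
--                 maxCredit = amounts[i]
--             if amounts[i] < maxDebit:
--                 di = i
--                 maxDebit = amounts[i]
--
--         if maxCredit == 0 and maxDebit == 0:
--             break
--
--         if maxCredit >= abs(maxDebit):
--             optArr[di][ci] = abs(maxDebit)
--             amounts[di] = 0
--             amounts[ci] -= abs(maxDebit)
--         else:
--             optArr[di][ci] = maxCredit
--             amounts[di] += maxCredit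
--             amounts[ci] = 0
--
--     return optArr
-- ===== SOURCE B (Python) =====
-- import heapq
-- from typing import List
--
-- def min_cash_flow(n: int, transaction: List[List[int]]) -> List[List[int]]:
--     amounts = [0] * n
--     for i in range(n):
--         for j in range(n):
--             v = transaction[i][j]
--             amounts[i] -= v
--             amounts[j] += v
--     credit = []  # min-heap of (-amount, person): pops the largest creditor, smallest index on ties
--     debit = []   # min-heap of (amount, person): pops the largest debtor, smallest index on ties
--     for i in range(n):
--         a = amounts[i]
--         if a > 0:
--             heapq.heappush(credit, (-a, i))
--         elif a < 0:
--             heapq.heappush(debit, (a, i))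
--     opt = [[0] * n for _ in range(n)]
--     while credit and debit:
--         c, ci = heapq.heappop(credit)
--         d, di = heapq.heappop(debit)
--         s = min(-c, -d)
--         opt[di][ci] = s
--         if -c > s:
--             heapq.heappush(credit, (c + s, ci))
--         if -d > s:
--             heapq.heappush(debit, (d + s, di))
--     return opt
-- ===== Notes on version B (the rewrite author's own statement) =====
-- stated objective: alternative
-- what changed: B replaces A's per-round full rescan of the balance array (and the intermediate adjacency-graph build) with two heapq priority queues of (amount, index) pairs: creditors and debtors are popped from the heaps and partial remainders pushed back, so no settlement round scans all n balances.
import Mathlib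
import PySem

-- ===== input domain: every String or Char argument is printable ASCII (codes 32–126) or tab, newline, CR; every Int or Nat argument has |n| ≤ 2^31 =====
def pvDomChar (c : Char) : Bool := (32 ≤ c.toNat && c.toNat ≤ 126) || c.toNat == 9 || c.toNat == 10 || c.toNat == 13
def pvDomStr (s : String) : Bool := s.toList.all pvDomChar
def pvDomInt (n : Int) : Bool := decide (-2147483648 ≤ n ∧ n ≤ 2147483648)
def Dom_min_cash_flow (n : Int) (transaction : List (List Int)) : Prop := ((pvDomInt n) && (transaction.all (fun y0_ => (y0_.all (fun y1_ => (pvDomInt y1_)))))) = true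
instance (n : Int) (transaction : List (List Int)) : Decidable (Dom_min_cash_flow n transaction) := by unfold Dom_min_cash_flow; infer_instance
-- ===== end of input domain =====

-- B replaces A's per-round full rescan of the balance array (and the intermediate adjacency-graph
-- build) with two heapq priority queues of (amount, index) pairs; remainders are pushed back, so no
-- settlement round scans all balances. Objective: alternative algorithmic structure, same results.

-- `amounts[i] -= x` / `amounts[i] += x` (every index used here is in range)
def pySubAt (am : List Int) (i : Nat) (x : Int) : List Int := am.set i (am.getD i 0 - x)
def pyAddAt (am : List Int) (i : Nat) (x : Int) : List Int := am.set i (am.getD i 0 + x)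

-- ===== PORT A =====
-- the single for-loop of A's while-body: running (maxCredit, ci, maxDebit, di)
def pvScanA (amts : List Int) (N : Nat) : Int × Option Nat × Int × Option Nat :=
  (List.range N).foldl
    (fun st i =>
      let a := amts.getD i 0
      let st1 := if st.1 < a then (a, some i, st.2.2.1, st.2.2.2) else st
      if a < st1.2.2.1 then (st1.1, st1.2.1, a, some i) else st1)
    (0, none, 0, none)

-- A's `while True` loop. Python's loop always breaks after at most N iterations (each pass
-- zeroes at least one nonzero balance and the balances always sum to 0), so fuel N is exact.
def pvLoopA : Nat → Nat → List (List Int) → List Int → List (List Int)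
  | 0, _, opt, _ => opt
  | f + 1, N, opt, amts =>
    let s := pvScanA amts N
    if s.1 = 0 ∧ s.2.2.1 = 0 then opt
    else
      match s.2.1, s.2.2.2 with
      | some c, some d =>
        if s.1 ≥ |s.2.2.1| then
          let amts1 := amts.set d 0
          let amts2 := amts1.set c (amts1.getD c 0 - |s.2.2.1|)
          pvLoopA f N (opt.modify d (fun row => row.set c |s.2.2.1|)) amts2
        else
          let amts1 := amts.set d (amts.getD d 0 + s.1)
          let amts2 := amts1.set c 0
          pvLoopA f N (opt.modify d (fun row => row.set c s.1)) amts2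
      -- Python would raise TypeError here (optArr[None][…]); unreachable: amounts sums to 0
      | _, _ => opt

def min_cash_flow (n : Int) (transaction : List (List Int)) : List (List Int) :=
  let N := n.toNat
  let optArr := List.replicate N (List.replicate N 0)
  let graph : List (List (Nat × Int)) :=
    (List.range N).map (fun i =>
      (List.range N).foldl (fun g j =>
        if (transaction.getD i []).getD j 0 ≠ 0 then g ++ [(j, (transaction.getD i []).getD j 0)] else g) [])
  let amounts : List Int :=
    (List.range N).foldl (fun am i =>
      (graph.getD i []).foldl (fun am p => pyAddAt (pySubAt am i p.2) p.1 p.2) am)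
      (List.replicate N 0)
  pvLoopA N N optArr amounts

-- ===== PORT B =====
-- port of heapq.heappush on int pairs: the queue is kept as a lexicographically sorted list,
-- heappop is taking the head — exactly heapq's contract (pop the smallest tuple)
def pqPush : List (Int × Nat) → (Int × Nat) → List (Int × Nat)
  | [], x => [x]
  | y :: t, x => if x.1 < y.1 ∨ (x.1 = y.1 ∧ x.2 < y.2) then x :: y :: t else y :: pqPush t x

-- B's `while credit and debit:` loop (fuel N is exact: each round shrinks the total heap size)
def pvSettleB : Nat → List (List Int) → List (Int × Nat) → List (Int × Nat) → List (List Int)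
  | 0, opt, _, _ => opt
  | f + 1, opt, credit, debit =>
    match credit, debit with
    | (c, ci) :: ct, (d, di) :: dt =>
      let s := min (-c) (-d)
      let opt' := opt.modify di (fun row => row.set ci s)
      let ct' := if s < -c then pqPush ct (c + s, ci) else ct
      let dt' := if s < -d then pqPush dt (d + s, di) else dt
      pvSettleB f opt' ct' dt'
    | _, _ => opt

def min_cash_flow_alt (n : Int) (transaction : List (List Int)) : List (List Int) :=
  let N := n.toNat
  let amounts : List Int :=
    (List.range N).foldl (fun am i =>
      (List.range N).foldl (fun am j =>
        pyAddAt (pySubAt am i ((transaction.getD i []).getD j 0)) j ((transaction.getD i []).getD j 0)) am)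
      (List.replicate N 0)
  let cd : List (Int × Nat) × List (Int × Nat) :=
    (List.range N).foldl (fun cd i =>
      let a := amounts.getD i 0
      if 0 < a then (pqPush cd.1 (-a, i), cd.2)
      else if a < 0 then (cd.1, pqPush cd.2 (a, i)) else cd) ([], [])
  pvSettleB N (List.replicate N (List.replicate N 0)) cd.1 cd.2

-- ===== PRECONDITION & SPEC =====
-- Pre_ excludes exactly the inputs on which Python A raises IndexError:
-- A reads transaction[i][j] for all i, j < n, so it needs n rows each of length ≥ n.
def Pre_min_cash_flow (n : Int) (transaction : List (List Int)) : Prop :=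
  n ≤ (transaction.length : Int) ∧ ∀ r ∈ transaction.take n.toNat, n ≤ (r.length : Int)
instance (n : Int) (transaction : List (List Int)) : Decidable (Pre_min_cash_flow n transaction) := by
  unfold Pre_min_cash_flow; infer_instance

def pvWitness_min_cash_flow : Int × List (List Int) := (2, [[0, 3], [0, 0]])

def Spec_min_cash_flow (n : Int) (transaction : List (List Int)) (out : List (List Int)) : Prop := out = min_cash_flow_alt n transaction
instance (n : Int) (transaction : List (List Int)) (out : List (List Int)) : Decidable (Spec_min_cash_flow n transaction out) := by unfold Spec_min_cash_flow; infer_instance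

-- ===== CLAIM (what is proved, stated in full; the proofs are below) =====
def Claim_equal_min_cash_flow : Prop := ∀ (n : Int) (transaction : List (List Int)), Dom_min_cash_flow n transaction → Pre_min_cash_flow n transaction → Spec_min_cash_flow n transaction (min_cash_flow n transaction)

-- ===== LEMMAS AND PROOFS =====

-- ---- pySubAt / pyAddAt basics ----
theorem pySubAt_zero (am : List Int) (i : Nat) : pySubAt am i 0 = am := by
  unfold pySubAt
  by_cases h : i < am.length
  · rw [List.getD_eq_getElem _ _ h]; simp
  · simp [List.set_eq_of_length_le (Nat.le_of_not_lt h)]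

theorem pyAddAt_zero (am : List Int) (i : Nat) : pyAddAt am i 0 = am := by
  unfold pyAddAt
  by_cases h : i < am.length
  · rw [List.getD_eq_getElem _ _ h]; simp
  · simp [List.set_eq_of_length_le (Nat.le_of_not_lt h)]

theorem sum_set (am : List Int) : ∀ (i : Nat), i < am.length →
    ∀ (v : Int), (am.set i v).sum = am.sum - am.getD i 0 + v := by
  induction am with
  | nil => intro i h; simp at h
  | cons x t ih =>
    intro i h v
    cases i with
    | zero => simp; ring
    | succ i =>
      have hi : i < t.length := by simpa using h
      simp [ih i hi v]; ring

theorem getD_set_ne (l : List Int) (i j : Nat) (v : Int) (h : i ≠ j) :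
    (l.set i v).getD j 0 = l.getD j 0 := by
  simp [List.getD, List.getElem?_set_ne h]

-- ---- fold invariant with membership ----
theorem foldl_invariant_mem {α β : Type} (P : β → Prop) (f : β → α → β) (l : List α) (init : β)
    (h0 : P init) (hstep : ∀ b a, a ∈ l → P b → P (f b a)) : P (l.foldl f init) := by
  induction l generalizing init with
  | nil => exact h0
  | cons x xs ih =>
    exact ih _ (hstep _ _ (by simp) h0) (fun b a ha hb => hstep b a (by simp [ha]) hb)

-- ---- the two amounts computations agree ----
theorem amounts_eq (N : Nat) (t : List (List Int)) :
    (List.range N).foldl (fun am i =>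
      (((List.range N).map (fun i =>
        (List.range N).foldl (fun g j =>
          if (t.getD i []).getD j 0 ≠ 0 then g ++ [(j, (t.getD i []).getD j 0)] else g) [])).getD i []).foldl
        (fun am p => pyAddAt (pySubAt am i p.2) p.1 p.2) am)
      (List.replicate N 0) =
    (List.range N).foldl (fun am i =>
      (List.range N).foldl (fun am j =>
        pyAddAt (pySubAt am i ((t.getD i []).getD j 0)) j ((t.getD i []).getD j 0)) am)
      (List.replicate N 0) := by
  apply PySem.List.foldl_congr_mem
  intro am i hi
  have hiN : i < N := List.mem_range.mp hi
  rw [List.getD_eq_getElem _ _ (by simpa using hiN)]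
  simp only [List.getElem_map, List.getElem_range]
  rw [PySem.List.foldl_append_ite (fun j => (t.getD i []).getD j 0 ≠ 0)
        (fun j => (j, (t.getD i []).getD j 0))]
  rw [List.nil_append, List.foldl_map, ← PySem.List.foldl_ite_eq_foldl_filter]
  apply PySem.List.foldl_congr_mem
  intro acc j _
  by_cases hv : (t.getD i []).getD j 0 ≠ 0
  · rw [if_pos hv]
  · rw [if_neg hv]
    push_neg at hv
    rw [hv, pySubAt_zero, pyAddAt_zero]

theorem sum_pySubAt (am : List Int) (i : Nat) (x : Int) (h : i < am.length) :
    (pySubAt am i x).sum = am.sum - x := by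
  unfold pySubAt
  rw [sum_set _ _ h]
  ring

theorem sum_pyAddAt (am : List Int) (i : Nat) (x : Int) (h : i < am.length) :
    (pyAddAt am i x).sum = am.sum + x := by
  unfold pyAddAt
  rw [sum_set _ _ h]
  ring

-- ---- length and sum of the shared amounts computation ----
theorem amountsB_inv (N : Nat) (t : List (List Int)) :
    ((List.range N).foldl (fun am i =>
      (List.range N).foldl (fun am j =>
        pyAddAt (pySubAt am i ((t.getD i []).getD j 0)) j ((t.getD i []).getD j 0)) am)
      (List.replicate N 0)).length = N ∧
    ((List.range N).foldl (fun am i =>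
      (List.range N).foldl (fun am j =>
        pyAddAt (pySubAt am i ((t.getD i []).getD j 0)) j ((t.getD i []).getD j 0)) am)
      (List.replicate N 0)).sum = 0 := by
  exact foldl_invariant_mem (fun am => am.length = N ∧ am.sum = 0)
    (fun am i =>
      (List.range N).foldl (fun am j =>
        pyAddAt (pySubAt am i ((t.getD i []).getD j 0)) j ((t.getD i []).getD j 0)) am)
    (List.range N) (List.replicate N 0)
    (by simp)
    (by
      intro am i hi hP
      have hiN : i < N := List.mem_range.mp hi
      exact foldl_invariant_mem (fun am => am.length = N ∧ am.sum = 0)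
        (fun am j => pyAddAt (pySubAt am i ((t.getD i []).getD j 0)) j ((t.getD i []).getD j 0))
        (List.range N) am hP
        (by
          intro am j hj hP'
          have hjN : j < N := List.mem_range.mp hj
          obtain ⟨hl, hs⟩ := hP'
          constructor
          · simp [pyAddAt, pySubAt, hl]
          · rw [sum_pyAddAt _ _ _ (by simp [pySubAt]; omega),
                sum_pySubAt _ _ _ (by omega)]
            omega))

-- ---- characterisation of A's scan ----
def pvScanStep (st : Int × Option Nat × Int × Option Nat) (a : Int) (i : Nat) :
    Int × Option Nat × Int × Option Nat :=
  let st1 := if st.1 < a then (a, some i, st.2.2.1, st.2.2.2) else st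
  if a < st1.2.2.1 then (st1.1, st1.2.1, a, some i) else st1

theorem pvScanStep_eq (mC mD : Int) (ci di : Option Nat) (a : Int) (i : Nat) :
    pvScanStep (mC, ci, mD, di) a i =
      ((if mC < a then a else mC), (if mC < a then some i else ci),
       (if a < mD then a else mD), (if a < mD then some i else di)) := by
  unfold pvScanStep
  by_cases h1 : mC < a <;> by_cases h2 : a < mD <;> simp [h1, h2]

def pvScanGo : List Int → Nat → (Int × Option Nat × Int × Option Nat) → Int × Option Nat × Int × Option Nat
  | [], _, st => st
  | x :: xs, k, st => pvScanGo xs (k + 1) (pvScanStep st x k)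

theorem scanA_eq_go (full : List Int) :
    ∀ (xs : List Int) (k : Nat) (st : Int × Option Nat × Int × Option Nat),
      full.drop k = xs →
      (List.range' k xs.length).foldl (fun st i => pvScanStep st (full.getD i 0) i) st =
        pvScanGo xs k st := by
  intro xs
  induction xs with
  | nil => intro k st _; rfl
  | cons x t ih =>
    intro k st hdrop
    have hk : k < full.length := by
      by_contra hk
      simp [List.drop_eq_nil_of_le (Nat.le_of_not_lt hk)] at hdrop
    have hfull := List.drop_eq_getElem_cons hk
    rw [hdrop] at hfull
    have hx : full[k] = x := (List.cons.injEq _ _ _ _ ▸ hfull).1.symm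
    have ht : full.drop (k + 1) = t := ((List.cons.injEq _ _ _ _ ▸ hfull).2).symm
    show (List.range' k (t.length + 1)).foldl _ st = _
    rw [List.range'_succ]
    simp only [List.foldl_cons]
    rw [List.getD_eq_getElem _ _ hk, hx]
    exact ih (k + 1) (pvScanStep st x k) ht

theorem foldl_max_swap (a x : Int) (t : List Int) :
    t.foldl max (max a x) = max a (t.foldl max x) := by
  induction t generalizing x with
  | nil => rfl
  | cons y t ih => simp only [List.foldl_cons, max_assoc]; exact ih (max x y)

theorem foldl_min_swap (a x : Int) (t : List Int) :
    t.foldl min (min a x) = min a (t.foldl min x) := by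
  induction t generalizing x with
  | nil => rfl
  | cons y t ih => simp only [List.foldl_cons, min_assoc]; exact ih (min x y)

theorem foldl_max_mem (x : Int) (t : List Int) : t.foldl max x ∈ x :: t := by
  induction t generalizing x with
  | nil => simp
  | cons y t ih =>
    have hmem := ih (max x y)
    show t.foldl max (max x y) ∈ x :: y :: t
    rcases List.mem_cons.mp hmem with h | h
    · rcases max_choice x y with hm | hm
      · rw [h, hm]; simp
      · rw [h, hm]; simp
    · simp [h]

theorem foldl_min_mem (x : Int) (t : List Int) : t.foldl min x ∈ x :: t := by
  induction t generalizing x with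
  | nil => simp
  | cons y t ih =>
    have hmem := ih (min x y)
    show t.foldl min (min x y) ∈ x :: y :: t
    rcases List.mem_cons.mp hmem with h | h
    · rcases min_choice x y with hm | hm
      · rw [h, hm]; simp
      · rw [h, hm]; simp
    · simp [h]

theorem foldl_min_le (b : Int) (l : List Int) : l.foldl min b ≤ b := by
  induction l generalizing b with
  | nil => exact le_refl b
  | cons x t ih => exact le_trans (ih (min b x)) (min_le_left b x)

theorem foldl_min_ge_mem (x : Int) (t : List Int) : ∀ y ∈ t, t.foldl min x ≤ y := by
  induction t generalizing x with
  | nil => intro y hy; cases hy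
  | cons z t ih =>
    intro y hy
    rcases List.mem_cons.mp hy with h' | h'
    · subst h'; exact le_trans (foldl_min_le _ t) (min_le_right x y)
    · exact ih (min x z) y h'

theorem idxOf_cons_ne (x M : Int) (xs : List Int) (h : ¬ x = M) :
    (x :: xs).idxOf M = xs.idxOf M + 1 := by
  simp [List.idxOf_cons, h]

theorem ite_max (mC x : Int) : (if mC < x then x else mC) = max mC x := by
  split_ifs with h
  · exact (max_eq_right h.le).symm
  · exact (max_eq_left (not_lt.mp h)).symm

theorem ite_min (mD x : Int) : (if x < mD then x else mD) = min mD x := by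
  split_ifs with h
  · exact (min_eq_right h.le).symm
  · exact (min_eq_left (not_lt.mp h)).symm

theorem credit_comp (mC x : Int) (t : List Int) (k : Nat) (ci : Option Nat) :
    (if max mC x < t.foldl max (max mC x) then some (k + 1 + t.idxOf (t.foldl max (max mC x)))
     else if mC < x then some k else ci) =
    (if mC < t.foldl max (max mC x) then some (k + (x :: t).idxOf (t.foldl max (max mC x))) else ci) := by
  by_cases h1 : mC < x
  · rw [max_eq_right h1.le]
    have hxM : x ≤ t.foldl max x := (PySem.List.le_foldl_max t x).1
    by_cases h2 : x < t.foldl max x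
    · have hne : ¬ x = t.foldl max x := by omega
      rw [if_pos h2, if_pos (h1.trans h2), idxOf_cons_ne x _ t hne]
      congr 1
      omega
    · have hMx : t.foldl max x = x := le_antisymm (not_lt.mp h2) hxM
      rw [if_neg h2, if_pos h1, if_pos (by omega : mC < t.foldl max x), hMx]
      simp [List.idxOf_cons]
  · have hxle : x ≤ mC := not_lt.mp h1
    rw [max_eq_left hxle]
    by_cases h2 : mC < t.foldl max mC
    · have hne : ¬ x = t.foldl max mC := by omega
      rw [if_pos h2, if_pos h2, idxOf_cons_ne x _ t hne]
      congr 1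
      omega
    · rw [if_neg h2, if_neg h2, if_neg h1]

theorem debit_comp (mD x : Int) (t : List Int) (k : Nat) (di : Option Nat) :
    (if t.foldl min (min mD x) < min mD x then some (k + 1 + t.idxOf (t.foldl min (min mD x)))
     else if x < mD then some k else di) =
    (if t.foldl min (min mD x) < mD then some (k + (x :: t).idxOf (t.foldl min (min mD x))) else di) := by
  by_cases h1 : x < mD
  · rw [min_eq_right h1.le]
    have hxM : t.foldl min x ≤ x := foldl_min_le x t
    by_cases h2 : t.foldl min x < x
    · have hne : ¬ x = t.foldl min x := by omega
      rw [if_pos h2, if_pos (h2.trans h1), idxOf_cons_ne x _ t hne]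
      congr 1
      omega
    · have hMx : t.foldl min x = x := le_antisymm hxM (not_lt.mp h2)
      rw [if_neg h2, if_pos h1, if_pos (by omega : t.foldl min x < mD), hMx]
      simp [List.idxOf_cons]
  · have hxge : mD ≤ x := not_lt.mp h1
    rw [min_eq_left hxge]
    by_cases h2 : t.foldl min mD < mD
    · have hne : ¬ x = t.foldl min mD := by omega
      rw [if_pos h2, if_pos h2, idxOf_cons_ne x _ t hne]
      congr 1
      omega
    · rw [if_neg h2, if_neg h2, if_neg h1]

theorem scanGo_spec : ∀ (xs : List Int) (k : Nat) (mC mD : Int) (ci di : Option Nat),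
    pvScanGo xs k (mC, ci, mD, di) =
      (xs.foldl max mC,
       (if mC < xs.foldl max mC then some (k + xs.idxOf (xs.foldl max mC)) else ci),
       xs.foldl min mD,
       (if xs.foldl min mD < mD then some (k + xs.idxOf (xs.foldl min mD)) else di)) := by
  intro xs
  induction xs with
  | nil => intro k mC mD ci di; simp [pvScanGo]
  | cons x t ih =>
    intro k mC mD ci di
    show pvScanGo t (k + 1) (pvScanStep (mC, ci, mD, di) x k) = _
    rw [pvScanStep_eq, ite_max, ite_min, ih]
    simp only [List.foldl_cons, Prod.mk.injEq]
    refine ⟨trivial, credit_comp mC x t k ci, trivial, debit_comp mD x t k di⟩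

theorem scanA_spec (amts : List Int) :
    pvScanA amts amts.length =
      (amts.foldl max 0,
       (if 0 < amts.foldl max 0 then some (amts.idxOf (amts.foldl max 0)) else none),
       amts.foldl min 0,
       (if amts.foldl min 0 < 0 then some (amts.idxOf (amts.foldl min 0)) else none)) := by
  have h1 : pvScanA amts amts.length =
      (List.range' 0 amts.length).foldl (fun st i => pvScanStep st (amts.getD i 0) i)
        (0, none, 0, none) := by
    rw [pvScanA, List.range_eq_range']
    rfl
  rw [h1, scanA_eq_go amts amts 0 _ (by simp)]
  rw [scanGo_spec]
  simp

-- ---- sums vs extrema ----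
theorem sum_nonneg_of_all (l : List Int) (h : ∀ y ∈ l, 0 ≤ y) : 0 ≤ l.sum := by
  induction l with
  | nil => simp
  | cons x t ih =>
    simp only [List.sum_cons]
    have := h x (by simp)
    have := ih (fun y hy => h y (by simp [hy]))
    omega

theorem sum_nonpos_of_all (l : List Int) (h : ∀ y ∈ l, y ≤ 0) : l.sum ≤ 0 := by
  induction l with
  | nil => simp
  | cons x t ih =>
    simp only [List.sum_cons]
    have := h x (by simp)
    have := ih (fun y hy => h y (by simp [hy]))
    omega

theorem mem_le_sum_of_nonneg (l : List Int) (h : ∀ y ∈ l, 0 ≤ y) : ∀ y ∈ l, y ≤ l.sum := by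
  induction l with
  | nil => intro y hy; cases hy
  | cons x t ih =>
    intro y hy
    simp only [List.sum_cons]
    have hx : 0 ≤ x := h x (by simp)
    have hts : 0 ≤ t.sum := sum_nonneg_of_all t (fun z hz => h z (by simp [hz]))
    rcases List.mem_cons.mp hy with h' | h'
    · omega
    · have := ih (fun z hz => h z (by simp [hz])) y h'
      omega

theorem sum_le_mem_of_nonpos (l : List Int) (h : ∀ y ∈ l, y ≤ 0) : ∀ y ∈ l, l.sum ≤ y := by
  induction l with
  | nil => intro y hy; cases hy
  | cons x t ih =>
    intro y hy
    simp only [List.sum_cons]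
    have hx : x ≤ 0 := h x (by simp)
    have hts : t.sum ≤ 0 := sum_nonpos_of_all t (fun z hz => h z (by simp [hz]))
    rcases List.mem_cons.mp hy with h' | h'
    · omega
    · have := ih (fun z hz => h z (by simp [hz])) y h'
      omega

-- in the non-break case of a zero-sum amounts list, the max is positive AND the min is negative
theorem pos_and_neg (x : Int) (t : List Int) (hsum : (x :: t).sum = 0)
    (hbr : ¬ (t.foldl max x ≤ 0 ∧ 0 ≤ t.foldl min x)) :
    0 < t.foldl max x ∧ t.foldl min x < 0 := by
  have hub : ∀ y ∈ x :: t, y ≤ t.foldl max x := by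
    intro y hy
    rcases List.mem_cons.mp hy with h' | h'
    · subst h'; exact (PySem.List.le_foldl_max t y).1
    · exact (PySem.List.le_foldl_max t x).2 y h'
  have hlb : ∀ y ∈ x :: t, t.foldl min x ≤ y := by
    intro y hy
    rcases List.mem_cons.mp hy with h' | h'
    · subst h'; exact foldl_min_le _ t
    · exact foldl_min_ge_mem x t y h'
  constructor
  · by_contra h
    push_neg at h
    have hall : ∀ y ∈ x :: t, y ≤ 0 := fun y hy => le_trans (hub y hy) h
    have hmn : 0 ≤ t.foldl min x := by
      have h1 := sum_le_mem_of_nonpos _ hall (t.foldl min x) (foldl_min_mem x t)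
      omega
    exact hbr ⟨h, hmn⟩
  · by_contra h
    push_neg at h
    have hall : ∀ y ∈ x :: t, 0 ≤ y := fun y hy => le_trans h (hlb y hy)
    have hmx : t.foldl max x ≤ 0 := by
      have h1 := mem_le_sum_of_nonneg _ hall (t.foldl max x) (foldl_max_mem x t)
      omega
    exact hbr ⟨hmx, h⟩

-- ---- max/min over the whole amounts list (init 0) ----
theorem mem_le_max0 (amts : List Int) : ∀ y ∈ amts, y ≤ amts.foldl max 0 :=
  (PySem.List.le_foldl_max amts 0).2

theorem min0_le_mem (amts : List Int) : ∀ y ∈ amts, amts.foldl min 0 ≤ y :=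
  foldl_min_ge_mem 0 amts

theorem max0_mem (amts : List Int) (h : 0 < amts.foldl max 0) : amts.foldl max 0 ∈ amts := by
  rcases List.mem_cons.mp (foldl_max_mem 0 amts) with h' | h'
  · omega
  · exact h'

theorem min0_mem (amts : List Int) (h : amts.foldl min 0 < 0) : amts.foldl min 0 ∈ amts := by
  rcases List.mem_cons.mp (foldl_min_mem 0 amts) with h' | h'
  · omega
  · exact h'

-- first occurrence: idxOf is minimal among indices holding the value
theorem idxOf_min (l : List Int) : ∀ (i : Nat) (h : i < l.length) (v : Int), l[i] = v → l.idxOf v ≤ i := by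
  induction l with
  | nil => intro i h; simp at h
  | cons x t ih =>
    intro i h v hv
    by_cases hx : x = v
    · simp [List.idxOf_cons, hx]
    · cases i with
      | zero => simp at hv; exact absurd hv hx
      | succ i =>
        rw [idxOf_cons_ne x v t hx]
        have := ih i (by simpa using h) v (by simpa using hv)
        omega

-- ---- the heap order ----
def lexLe (x y : Int × Nat) : Prop := x.1 < y.1 ∨ (x.1 = y.1 ∧ x.2 ≤ y.2)

theorem lexLe_total (x y : Int × Nat) (h : ¬ (x.1 < y.1 ∨ (x.1 = y.1 ∧ x.2 < y.2))) : lexLe y x := by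
  unfold lexLe
  omega

theorem lexLe_trans (x y z : Int × Nat) (h1 : lexLe x y) (h2 : lexLe y z) : lexLe x z := by
  unfold lexLe at *
  omega

theorem lexLe_antisymm (x y : Int × Nat) (h1 : lexLe x y) (h2 : lexLe y x) : x = y := by
  unfold lexLe at *
  have : x.1 = y.1 ∧ x.2 = y.2 := by omega
  exact Prod.ext this.1 this.2

theorem pqPush_perm (l : List (Int × Nat)) (x : Int × Nat) : (pqPush l x).Perm (x :: l) := by
  induction l with
  | nil => simp [pqPush]
  | cons y t ih =>
    unfold pqPush
    split_ifs with h
    · exact List.Perm.refl _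
    · exact List.Perm.trans (List.Perm.cons y ih) (List.Perm.swap x y t)

theorem pqPush_sorted (l : List (Int × Nat)) (x : Int × Nat) (hs : l.Pairwise lexLe) :
    (pqPush l x).Pairwise lexLe := by
  induction l with
  | nil => simp [pqPush, List.pairwise_singleton]
  | cons y t ih =>
    unfold pqPush
    have hy := List.pairwise_cons.mp hs
    split_ifs with h
    · refine List.pairwise_cons.mpr ⟨?_, hs⟩
      intro z hz
      have hxy : lexLe x y := by unfold lexLe; omega
      rcases List.mem_cons.mp hz with h' | h'
      · subst h'; exact hxy
      · exact lexLe_trans x y z hxy (hy.1 z h')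
    · refine List.pairwise_cons.mpr ⟨?_, ih hy.2⟩
      intro z hz
      rcases List.mem_cons.mp ((pqPush_perm t x).mem_iff.mp hz) with h' | h'
      · subst h'; exact lexLe_total _ y h
      · exact hy.1 z h'

-- ---- the entry sets: positive / negative balances as (key, index) pairs ----
def entOf (f : Int → Nat → Option (Int × Nat)) (amts : List Int) : List (Int × Nat) :=
  (List.range amts.length).filterMap (fun i => f (amts.getD i 0) i)

def fC (a : Int) (i : Nat) : Option (Int × Nat) := if 0 < a then some (-a, i) else none
def fD (a : Int) (i : Nat) : Option (Int × Nat) := if a < 0 then some (a, i) else none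

def entL (f : Int → Nat → Option (Int × Nat)) (amts : List Int) (p : Nat) : List (Int × Nat) :=
  (List.range p).filterMap (fun i => f (amts.getD i 0) i)
def entR (f : Int → Nat → Option (Int × Nat)) (amts : List Int) (p : Nat) : List (Int × Nat) :=
  (List.range' (p + 1) (amts.length - (p + 1))).filterMap (fun i => f (amts.getD i 0) i)

theorem filterMap_range_split {β : Type} (g : Nat → Option β) (N p : Nat) (hp : p < N) :
    (List.range N).filterMap g =
      (List.range p).filterMap g ++ (g p).toList ++ (List.range' (p + 1) (N - (p + 1))).filterMap g := by
  obtain ⟨M, rfl⟩ : ∃ M, N = p + (M + 1) := ⟨N - p - 1, by omega⟩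
  have h := List.range'_append (s := 0) (m := p) (n := M + 1) (step := 1)
  simp only [Nat.zero_add, Nat.one_mul] at h
  have hM : p + (M + 1) - (p + 1) = M := by omega
  rw [hM, List.range_eq_range', ← h, List.range'_succ, List.filterMap_append, ← List.range_eq_range']
  cases hgp : g p <;> simp [List.filterMap_cons, hgp]

theorem entOf_split (f : Int → Nat → Option (Int × Nat)) (amts : List Int) (p : Nat)
    (hp : p < amts.length) :
    entOf f amts = entL f amts p ++ (f (amts.getD p 0) p).toList ++ entR f amts p := by
  unfold entOf entL entR
  exact filterMap_range_split _ _ p hp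

theorem entOf_set (f : Int → Nat → Option (Int × Nat)) (amts : List Int) (p : Nat) (v : Int)
    (hp : p < amts.length) :
    entOf f (amts.set p v) = entL f amts p ++ (f v p).toList ++ entR f amts p := by
  unfold entOf entL entR
  rw [List.length_set]
  rw [filterMap_range_split (fun i => f ((amts.set p v).getD i 0) i) amts.length p hp]
  have hgp : (amts.set p v).getD p 0 = v := by simp [List.getD, hp]
  rw [hgp]
  congr 1
  · congr 1
    apply List.filterMap_congr
    intro i hi
    have : i < p := List.mem_range.mp hi
    rw [getD_set_ne _ _ _ _ (by omega)]
  · apply List.filterMap_congr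
    intro i hi
    have := List.mem_range'_1.mp hi
    rw [getD_set_ne _ _ _ _ (by omega)]

theorem mem_entC (amts : List Int) (e : Int × Nat) :
    e ∈ entOf fC amts ↔ e.2 < amts.length ∧ 0 < amts.getD e.2 0 ∧ e.1 = -(amts.getD e.2 0) := by
  obtain ⟨a, i⟩ := e
  unfold entOf fC
  simp only [List.mem_filterMap, List.mem_range]
  constructor
  · rintro ⟨j, hj, hfj⟩
    split_ifs at hfj with h
    · cases hfj
      exact ⟨hj, h, rfl⟩
  · rintro ⟨h1, h2, h3⟩
    exact ⟨i, h1, by rw [if_pos h2, h3]⟩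

theorem mem_entD (amts : List Int) (e : Int × Nat) :
    e ∈ entOf fD amts ↔ e.2 < amts.length ∧ amts.getD e.2 0 < 0 ∧ e.1 = amts.getD e.2 0 := by
  obtain ⟨a, i⟩ := e
  unfold entOf fD
  simp only [List.mem_filterMap, List.mem_range]
  constructor
  · rintro ⟨j, hj, hfj⟩
    split_ifs at hfj with h
    · cases hfj
      exact ⟨hj, h, rfl⟩
  · rintro ⟨h1, h2, h3⟩
    exact ⟨i, h1, by rw [if_pos h2, h3]⟩

-- a sorted list permuting a set with a lex-least element m starts with m
theorem sorted_perm_head (l S : List (Int × Nat)) (hs : l.Pairwise lexLe) (hperm : l.Perm S)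
    (m : Int × Nat) (hm : m ∈ S) (hmin : ∀ e ∈ S, lexLe m e) :
    ∃ tl, l = m :: tl := by
  cases l with
  | nil => exact absurd (hperm.symm.mem_iff.mp hm) (by simp)
  | cons h tl =>
    have hh : h ∈ S := hperm.mem_iff.mp (by simp)
    have h1 : lexLe m h := hmin h hh
    have hm' : m ∈ h :: tl := hperm.symm.mem_iff.mp hm
    have h2 : lexLe h m := by
      rcases List.mem_cons.mp hm' with h' | h'
      · subst h'; unfold lexLe; omega
      · exact (List.pairwise_cons.mp hs).1 m h'
    rw [lexLe_antisymm m h h1 h2] at *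
    exact ⟨tl, rfl⟩

-- convenient cons forms of the split/set equations
theorem entOf_split_some (f : Int → Nat → Option (Int × Nat)) (amts : List Int) (p : Nat)
    (e : Int × Nat) (hp : p < amts.length) (he : f (amts.getD p 0) p = some e) :
    entOf f amts = entL f amts p ++ e :: entR f amts p := by
  rw [entOf_split f amts p hp, he]; simp

theorem entOf_set_some (f : Int → Nat → Option (Int × Nat)) (amts : List Int) (p : Nat) (v : Int)
    (e : Int × Nat) (hp : p < amts.length) (he : f v p = some e) :
    entOf f (amts.set p v) = entL f amts p ++ e :: entR f amts p := by
  rw [entOf_set f amts p v hp, he]; simp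

theorem entOf_set_none (f : Int → Nat → Option (Int × Nat)) (amts : List Int) (p : Nat) (v : Int)
    (hp : p < amts.length) (he : f v p = none) :
    entOf f (amts.set p v) = entL f amts p ++ entR f amts p := by
  rw [entOf_set f amts p v hp, he]; simp

-- replacing values that f ignores does not change the entry lists
theorem ent_congr (f : Int → Nat → Option (Int × Nat)) (amts amts' : List Int) (p : Nat)
    (hlen : amts'.length = amts.length)
    (h : ∀ i, f (amts'.getD i 0) i = f (amts.getD i 0) i) :
    entL f amts' p = entL f amts p ∧ entR f amts' p = entR f amts p ∧
      entOf f amts' = entOf f amts := by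
  refine ⟨?_, ?_, ?_⟩
  · unfold entL; exact List.filterMap_congr (fun i _ => h i)
  · unfold entR; rw [hlen]; exact List.filterMap_congr (fun i _ => h i)
  · unfold entOf; rw [hlen]; exact List.filterMap_congr (fun i _ => h i)

-- the lexicographically least credit entry is (-maxCredit, first index of maxCredit)
theorem credit_head_min (amts : List Int) (h : 0 < amts.foldl max 0) :
    ((-(amts.foldl max 0), amts.idxOf (amts.foldl max 0)) ∈ entOf fC amts) ∧
    ∀ e ∈ entOf fC amts, lexLe (-(amts.foldl max 0), amts.idxOf (amts.foldl max 0)) e := by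
  have hmem : amts.foldl max 0 ∈ amts := max0_mem amts h
  have hk : amts.idxOf (amts.foldl max 0) < amts.length := List.idxOf_lt_length_of_mem hmem
  have hgk : amts.getD (amts.idxOf (amts.foldl max 0)) 0 = amts.foldl max 0 := by
    rw [List.getD_eq_getElem _ _ hk]; exact List.getElem_idxOf hk
  constructor
  · rw [mem_entC]
    exact ⟨hk, by rw [hgk]; exact h, by rw [hgk]⟩
  · intro e he
    rw [mem_entC] at he
    obtain ⟨h1, h2, h3⟩ := he
    have hmm : amts.getD e.2 0 ∈ amts := by
      rw [List.getD_eq_getElem _ _ h1]; exact List.getElem_mem h1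
    have hle : amts.getD e.2 0 ≤ amts.foldl max 0 := mem_le_max0 amts _ hmm
    by_cases heq : amts.getD e.2 0 = amts.foldl max 0
    · have heq' : amts[e.2] = amts.foldl max 0 := by
        rw [← List.getD_eq_getElem _ _ h1]; exact heq
      have hidx := idxOf_min amts e.2 h1 _ heq'
      unfold lexLe; omega
    · unfold lexLe; omega

-- the lexicographically least debit entry is (maxDebit, first index of maxDebit)
theorem debit_head_min (amts : List Int) (h : amts.foldl min 0 < 0) :
    ((amts.foldl min 0, amts.idxOf (amts.foldl min 0)) ∈ entOf fD amts) ∧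
    ∀ e ∈ entOf fD amts, lexLe (amts.foldl min 0, amts.idxOf (amts.foldl min 0)) e := by
  have hmem : amts.foldl min 0 ∈ amts := min0_mem amts h
  have hk : amts.idxOf (amts.foldl min 0) < amts.length := List.idxOf_lt_length_of_mem hmem
  have hgk : amts.getD (amts.idxOf (amts.foldl min 0)) 0 = amts.foldl min 0 := by
    rw [List.getD_eq_getElem _ _ hk]; exact List.getElem_idxOf hk
  constructor
  · rw [mem_entD]
    exact ⟨hk, by rw [hgk]; exact h, by rw [hgk]⟩
  · intro e he
    rw [mem_entD] at he
    obtain ⟨h1, h2, h3⟩ := he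
    have hmm : amts.getD e.2 0 ∈ amts := by
      rw [List.getD_eq_getElem _ _ h1]; exact List.getElem_mem h1
    have hle : amts.foldl min 0 ≤ amts.getD e.2 0 := min0_le_mem amts _ hmm
    by_cases heq : amts.getD e.2 0 = amts.foldl min 0
    · have heq' : amts[e.2] = amts.foldl min 0 := by
        rw [← List.getD_eq_getElem _ _ h1]; exact heq
      have hidx := idxOf_min amts e.2 h1 _ heq'
      unfold lexLe; omega
    · unfold lexLe; omega

-- pushing the remainder lands it at its index-split position, up to permutation
theorem push_perm_target (ctail L R : List (Int × Nat)) (x : Int × Nat)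
    (h : ctail.Perm (L ++ R)) : (pqPush ctail x).Perm (L ++ x :: R) :=
  (pqPush_perm ctail x).trans ((h.cons x).trans List.perm_middle.symm)

-- in the non-break case of a zero-sum list, the max is positive and the min negative
theorem max_pos_min_neg (amts : List Int) (hsum : amts.sum = 0)
    (hbr : ¬ (amts.foldl max 0 = 0 ∧ amts.foldl min 0 = 0)) :
    0 < amts.foldl max 0 ∧ amts.foldl min 0 < 0 := by
  cases amts with
  | nil => exact absurd ⟨rfl, rfl⟩ hbr
  | cons x t =>
    have hMs : (x :: t).foldl max 0 = max 0 (t.foldl max x) := by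
      show t.foldl max (max 0 x) = _; exact foldl_max_swap 0 x t
    have hms : (x :: t).foldl min 0 = min 0 (t.foldl min x) := by
      show t.foldl min (min 0 x) = _; exact foldl_min_swap 0 x t
    have hbr' : ¬ (t.foldl max x ≤ 0 ∧ 0 ≤ t.foldl min x) := by
      intro hcon
      exact hbr ⟨by rw [hMs]; omega, by rw [hms]; omega⟩
    obtain ⟨h1, h2⟩ := pos_and_neg x t hsum hbr'
    constructor
    · rw [hMs]; omega
    · rw [hms]; omega

-- B's initial heap build produces sorted heaps holding exactly the credit/debit entries
theorem build_heaps (amts : List Int) (l : List Nat) : ∀ (c0 d0 : List (Int × Nat)),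
    c0.Pairwise lexLe → d0.Pairwise lexLe →
    (l.foldl (fun cd i =>
        let a := amts.getD i 0
        if 0 < a then (pqPush cd.1 (-a, i), cd.2)
        else if a < 0 then (cd.1, pqPush cd.2 (a, i)) else cd) (c0, d0)).1.Pairwise lexLe ∧
    (l.foldl (fun cd i =>
        let a := amts.getD i 0
        if 0 < a then (pqPush cd.1 (-a, i), cd.2)
        else if a < 0 then (cd.1, pqPush cd.2 (a, i)) else cd) (c0, d0)).2.Pairwise lexLe ∧
    (l.foldl (fun cd i =>
        let a := amts.getD i 0
        if 0 < a then (pqPush cd.1 (-a, i), cd.2)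
        else if a < 0 then (cd.1, pqPush cd.2 (a, i)) else cd) (c0, d0)).1.Perm
      (c0 ++ l.filterMap (fun i => fC (amts.getD i 0) i)) ∧
    (l.foldl (fun cd i =>
        let a := amts.getD i 0
        if 0 < a then (pqPush cd.1 (-a, i), cd.2)
        else if a < 0 then (cd.1, pqPush cd.2 (a, i)) else cd) (c0, d0)).2.Perm
      (d0 ++ l.filterMap (fun i => fD (amts.getD i 0) i)) := by
  induction l with
  | nil =>
    intro c0 d0 hc hd
    exact ⟨hc, hd, by simp, by simp⟩
  | cons i t ih =>
    intro c0 d0 hc hd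
    simp only [List.foldl_cons, List.filterMap_cons]
    by_cases h1 : 0 < amts.getD i 0
    · have hfc : fC (amts.getD i 0) i = some (-(amts.getD i 0), i) := by
        unfold fC; rw [if_pos h1]
      have hfd : fD (amts.getD i 0) i = none := by
        unfold fD; rw [if_neg (by omega)]
      rw [hfc, hfd]
      dsimp only
      rw [if_pos h1]
      obtain ⟨ihc, ihd, ihcp, ihdp⟩ := ih (pqPush c0 (-(amts.getD i 0), i)) d0
        (pqPush_sorted c0 _ hc) hd
      refine ⟨ihc, ihd, ?_, ihdp⟩
      refine ihcp.trans ?_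
      exact (((pqPush_perm c0 _).append_right _).trans List.perm_middle.symm)
    · by_cases h2 : amts.getD i 0 < 0
      · have hfc : fC (amts.getD i 0) i = none := by
          unfold fC; rw [if_neg h1]
        have hfd : fD (amts.getD i 0) i = some (amts.getD i 0, i) := by
          unfold fD; rw [if_pos h2]
        rw [hfc, hfd]
        dsimp only
        rw [if_neg h1, if_pos h2]
        obtain ⟨ihc, ihd, ihcp, ihdp⟩ := ih c0 (pqPush d0 (amts.getD i 0, i))
          hc (pqPush_sorted d0 _ hd)
        refine ⟨ihc, ihd, ihcp, ?_⟩
        refine ihdp.trans ?_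
        exact (((pqPush_perm d0 _).append_right _).trans List.perm_middle.symm)
      · have hfc : fC (amts.getD i 0) i = none := by
          unfold fC; rw [if_neg h1]
        have hfd : fD (amts.getD i 0) i = none := by
          unfold fD; rw [if_neg h2]
        rw [hfc, hfd]
        dsimp only
        rw [if_neg h1, if_neg h2]
        exact ih c0 d0 hc hd

-- the heart of the equivalence: A's rescanning loop tracks B's heap loop step for step
theorem loop_heap_eq : ∀ (fuel : Nat) (opt : List (List Int)) (amts : List Int)
    (credit debit : List (Int × Nat)),
    amts.sum = 0 →
    credit.Pairwise lexLe → debit.Pairwise lexLe →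
    credit.Perm (entOf fC amts) → debit.Perm (entOf fD amts) →
    pvLoopA fuel amts.length opt amts = pvSettleB fuel opt credit debit := by
  intro fuel
  induction fuel with
  | zero => intro opt amts credit debit _ _ _ _ _; rfl
  | succ f ih =>
    intro opt amts credit debit hsum hcs hds hcp hdp
    by_cases hbr : amts.foldl max 0 = 0 ∧ amts.foldl min 0 = 0
    · have hA : pvLoopA (f + 1) amts.length opt amts = opt := by
        simp only [pvLoopA]
        rw [scanA_spec]
        dsimp only
        rw [if_pos hbr]
      have hce : entOf fC amts = [] := by
        unfold entOf
        rw [List.filterMap_eq_nil_iff]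
        intro i hi
        have hiN := List.mem_range.mp hi
        have hmm : amts.getD i 0 ∈ amts := by
          rw [List.getD_eq_getElem _ _ hiN]; exact List.getElem_mem hiN
        have := mem_le_max0 amts _ hmm
        unfold fC
        rw [if_neg (by omega)]
      have hcnil : credit = [] := by
        have h' := hcp
        rw [hce] at h'
        exact h'.eq_nil
      rw [hA, hcnil]
      rfl
    · obtain ⟨hMpos, hmneg⟩ := max_pos_min_neg amts hsum hbr
      set M := amts.foldl max 0 with hMdef
      set m := amts.foldl min 0 with hmdef
      set ci := amts.idxOf M with hcidef
      set di := amts.idxOf m with hdidef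
      have hciL : ci < amts.length := List.idxOf_lt_length_of_mem (max0_mem amts hMpos)
      have hdiL : di < amts.length := List.idxOf_lt_length_of_mem (min0_mem amts hmneg)
      have hgci : amts.getD ci 0 = M := by
        rw [List.getD_eq_getElem _ _ hciL]; exact List.getElem_idxOf _
      have hgdi : amts.getD di 0 = m := by
        rw [List.getD_eq_getElem _ _ hdiL]; exact List.getElem_idxOf _
      have hne : di ≠ ci := by
        intro hh
        rw [hh, hgci] at hgdi
        omega
      obtain ⟨hcin, hcmin⟩ := credit_head_min amts hMpos
      obtain ⟨ctail, hc⟩ := sorted_perm_head credit _ hcs hcp _ hcin hcmin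
      obtain ⟨hdin, hdmin⟩ := debit_head_min amts hmneg
      obtain ⟨dtail, hd⟩ := sorted_perm_head debit _ hds hdp _ hdin hdmin
      have hcs' : ctail.Pairwise lexLe := by rw [hc] at hcs; exact hcs.of_cons
      have hds' : dtail.Pairwise lexLe := by rw [hd] at hds; exact hds.of_cons
      have hcsplit : entOf fC amts = entL fC amts ci ++ (-M, ci) :: entR fC amts ci :=
        entOf_split_some fC amts ci (-M, ci) hciL
          (by rw [hgci]; unfold fC; rw [if_pos hMpos])
      have hdsplit : entOf fD amts = entL fD amts di ++ (m, di) :: entR fD amts di :=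
        entOf_split_some fD amts di (m, di) hdiL
          (by rw [hgdi]; unfold fD; rw [if_pos hmneg])
      have hct : ctail.Perm (entL fC amts ci ++ entR fC amts ci) := by
        have h' := hcp
        rw [hc, hcsplit] at h'
        exact (h'.trans List.perm_middle).cons_inv
      have hdt : dtail.Perm (entL fD amts di ++ entR fD amts di) := by
        have h' := hdp
        rw [hd, hdsplit] at h'
        exact (h'.trans List.perm_middle).cons_inv
      -- unfold one step of A
      have hAstep : pvLoopA (f + 1) amts.length opt amts =
          (if M ≥ |m| then
            pvLoopA f amts.length (opt.modify di (fun row => row.set ci |m|))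
              (((amts.set di 0).set ci ((amts.set di 0).getD ci 0 - |m|)))
          else
            pvLoopA f amts.length (opt.modify di (fun row => row.set ci M))
              ((amts.set di (amts.getD di 0 + M)).set ci 0)) := by
        simp only [pvLoopA]
        rw [scanA_spec]
        dsimp only
        rw [if_pos hMpos, if_pos hmneg]
        rw [if_neg (by intro hh; exact hbr ⟨hh.1, hh.2⟩)]
      have habs : |m| = -m := abs_of_neg hmneg
      have hg1 : (amts.set di 0).getD ci 0 = M := by
        rw [getD_set_ne _ _ _ _ hne, hgci]
      -- unfold one step of B
      have hBstep : pvSettleB (f + 1) opt credit debit =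
          pvSettleB f (opt.modify di (fun row => row.set ci (min M (-m))))
            (if min M (-m) < M then pqPush ctail (-M + min M (-m), ci) else ctail)
            (if min M (-m) < -m then pqPush dtail (m + min M (-m), di) else dtail) := by
        rw [hc, hd]
        simp only [pvSettleB]
        rw [neg_neg]
      rw [hAstep, hBstep, habs]
      by_cases hge : -m ≤ M
      · -- settle the full debt -m
        rw [if_pos (show M ≥ -m from hge), min_eq_right hge]
        have hmin1 : ¬ (-m < -m) := by omega
        rw [if_neg hmin1]
        set amts1 := amts.set di 0 with hamts1
        have hg1'' : amts1.getD ci 0 = M := hg1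
        rw [hg1'']
        set amts2 := amts1.set ci (M - -m) with hamts2
        have hlen1 : amts1.length = amts.length := by simp [hamts1]
        have hlen2 : amts2.length = amts.length := by simp [hamts2, hamts1]
        have hsum2 : amts2.sum = 0 := by
          have h1 : amts1.sum = -m := by
            rw [hamts1, sum_set _ _ hdiL, hgdi, hsum]; ring
          rw [hamts2, sum_set _ _ (by omega : ci < amts1.length), hg1, h1]; ring
        -- credit entries of amts1 = those of amts
        have hfc1 : ∀ i, fC (amts1.getD i 0) i = fC (amts.getD i 0) i := by
          intro i
          by_cases hi : di = i
          · subst hi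
            have : amts1.getD di 0 = 0 := by simp [hamts1, List.getD, hdiL]
            rw [this, hgdi]
            unfold fC
            rw [if_neg (by omega), if_neg (by omega)]
          · rw [hamts1, getD_set_ne _ _ _ _ hi]
        obtain ⟨hcl1, hcr1, hco1⟩ := ent_congr fC amts amts1 ci hlen1 hfc1
        -- debit entries of amts2 = those of amts1
        have hfd2 : ∀ i, fD (amts2.getD i 0) i = fD (amts1.getD i 0) i := by
          intro i
          by_cases hi : ci = i
          · subst hi
            have h2 : amts2.getD ci 0 = M - -m := by
              rw [hamts2]; simp [List.getD, show ci < amts1.length by omega]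
            rw [h2, hg1]
            unfold fD
            rw [if_neg (by omega), if_neg (by omega)]
          · rw [hamts2, getD_set_ne _ _ _ _ hi]
        obtain ⟨_, _, hdo2⟩ := ent_congr fD amts1 amts2 di (by omega) hfd2
        have hdent1 : entOf fD amts1 = entL fD amts di ++ entR fD amts di :=
          entOf_set_none fD amts di 0 hdiL (by unfold fD; rw [if_neg (by omega)])
        have hdperm : dtail.Perm (entOf fD amts2) := by
          rw [hdo2, hdent1]; exact hdt
        by_cases hlt : -m < M
        · rw [if_pos hlt]
          have hval : (-(M - -m) : Int) = -M + -m := by ring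
          have hcent2 : entOf fC amts2 = entL fC amts ci ++ (-M + -m, ci) :: entR fC amts ci := by
            rw [hamts2, entOf_set_some fC amts1 ci (M - -m) (-(M - -m), ci) (by omega)
                  (by unfold fC; rw [if_pos (by omega)]), hcl1, hcr1, hval]
          have hcperm : (pqPush ctail (-M + -m, ci)).Perm (entOf fC amts2) := by
            rw [hcent2]; exact push_perm_target ctail _ _ _ hct
          have := ih (opt.modify di (fun row => row.set ci (-m))) amts2
            (pqPush ctail (-M + -m, ci)) dtail hsum2
            (pqPush_sorted ctail _ hcs') hds' hcperm hdperm
          rw [hlen2] at this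
          exact this
        · rw [if_neg hlt]
          have hMeq : M = -m := by omega
          have hcent2 : entOf fC amts2 = entL fC amts ci ++ entR fC amts ci := by
            rw [hamts2, entOf_set_none fC amts1 ci (M - -m) (by omega)
                  (by unfold fC; rw [if_neg (by omega)]), hcl1, hcr1]
          have hcperm : ctail.Perm (entOf fC amts2) := by
            rw [hcent2]; exact hct
          have := ih (opt.modify di (fun row => row.set ci (-m))) amts2 ctail dtail hsum2
            hcs' hds' hcperm hdperm
          rw [hlen2] at this
          exact this
      · -- settle only the credit M
        rw [if_neg (show ¬ (M ≥ -m) from hge), min_eq_left (by omega)]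
        have hmin1 : ¬ (M < M) := by omega
        rw [if_neg hmin1, if_pos (by omega : M < -m)]
        rw [hgdi]
        set amts1 := amts.set di (m + M) with hamts1
        set amts2 := amts1.set ci 0 with hamts2
        have hlen1 : amts1.length = amts.length := by simp [hamts1]
        have hlen2 : amts2.length = amts.length := by simp [hamts2, hamts1]
        have hg1' : amts1.getD ci 0 = M := by
          rw [hamts1, getD_set_ne _ _ _ _ hne, hgci]
        have hsum2 : amts2.sum = 0 := by
          have h1 : amts1.sum = M := by
            rw [hamts1, sum_set _ _ hdiL, hgdi, hsum]; ring
          rw [hamts2, sum_set _ _ (by omega : ci < amts1.length), hg1', h1]; ring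
        -- credit entries of amts1 = those of amts
        have hfc1 : ∀ i, fC (amts1.getD i 0) i = fC (amts.getD i 0) i := by
          intro i
          by_cases hi : di = i
          · subst hi
            have : amts1.getD di 0 = m + M := by simp [hamts1, List.getD, hdiL]
            rw [this, hgdi]
            unfold fC
            rw [if_neg (by omega), if_neg (by omega)]
          · rw [hamts1, getD_set_ne _ _ _ _ hi]
        obtain ⟨hcl1, hcr1, hco1⟩ := ent_congr fC amts amts1 ci hlen1 hfc1
        have hcent2 : entOf fC amts2 = entL fC amts ci ++ entR fC amts ci := by
          rw [hamts2, entOf_set_none fC amts1 ci 0 (by omega)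
                (by unfold fC; rw [if_neg (by omega)]), hcl1, hcr1]
        have hcperm : ctail.Perm (entOf fC amts2) := by
          rw [hcent2]; exact hct
        -- debit entries: the debtor's entry is replaced by the remainder
        have hdent1 : entOf fD amts1 = entL fD amts di ++ (m + M, di) :: entR fD amts di := by
          rw [hamts1, entOf_set_some fD amts di (m + M) (m + M, di) hdiL
                (by unfold fD; rw [if_pos (by omega)])]
        have hfd2 : ∀ i, fD (amts2.getD i 0) i = fD (amts1.getD i 0) i := by
          intro i
          by_cases hi : ci = i
          · subst hi
            have h2 : amts2.getD ci 0 = 0 := by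
              rw [hamts2]; simp [List.getD, show ci < amts1.length by omega]
            rw [h2, hg1']
            unfold fD
            rw [if_neg (by omega), if_neg (by omega)]
          · rw [hamts2, getD_set_ne _ _ _ _ hi]
        obtain ⟨_, _, hdo2⟩ := ent_congr fD amts1 amts2 di (by omega) hfd2
        have hdperm : (pqPush dtail (m + M, di)).Perm (entOf fD amts2) := by
          rw [hdo2, hdent1]; exact push_perm_target dtail _ _ _ hdt
        have := ih (opt.modify di (fun row => row.set ci M)) amts2 ctail
          (pqPush dtail (m + M, di)) hsum2 hcs' (pqPush_sorted dtail _ hds') hcperm hdperm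
        rw [hlen2] at this
        exact this

-- ===== VERDICT (by name: the statement is the Claim_ definition above) =====
theorem min_cash_flow_spec : Claim_equal_min_cash_flow := by
  intro n t _ _
  show min_cash_flow n t = min_cash_flow_alt n t
  unfold min_cash_flow min_cash_flow_alt
  dsimp only
  rw [amounts_eq]
  obtain ⟨hlen, hsum⟩ := amountsB_inv n.toNat t
  obtain ⟨hbc, hbd, hbcp, hbdp⟩ :=
    build_heaps
      ((List.range n.toNat).foldl (fun am i =>
        (List.range n.toNat).foldl (fun am j =>
          pyAddAt (pySubAt am i ((t.getD i []).getD j 0)) j ((t.getD i []).getD j 0)) am)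
        (List.replicate n.toNat 0))
      (List.range n.toNat) [] [] List.Pairwise.nil List.Pairwise.nil
  have h := loop_heap_eq n.toNat (List.replicate n.toNat (List.replicate n.toNat 0)) _
    _ _ hsum hbc hbd
    (by
      refine hbcp.trans ?_
      rw [List.nil_append]
      unfold entOf
      rw [hlen])
    (by
      refine hbdp.trans ?_
      rw [List.nil_append]
      unfold entOf
      rw [hlen])
  rw [hlen] at h
  exact h
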